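-- pv_equiv track=rewrite | github.com/grafalex82/zxemulator | misc/dump_font.py | get_scan_line
-- ===== SOURCE A (Python) =====
-- def get_scan_line(font, char, line, offset):
--     index = (char << 3) + line + offset
--     byte = font[index]
--     line = ""
--     for j in range(8):
--         ch = "@" if byte & 0x01 else " "
--         line = ch + line
--         byte >>= 1
--
--     return line
-- ===== SOURCE B (Python) =====
-- def get_scan_line(font, char, line, offset):
--     byte = font[(char << 3) + line + offset]
--     return format(byte & 0xFF, '08b').translate(str.maketrans('01', ' @'))
-- ===== Notes on version B (the rewrite author's own statement) =====
-- stated objective: idiomatic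
-- what changed: B replaces A's 8-step bit-shift/prepend accumulator loop with a closed-form binary formatter (format(byte & 0xFF, '08b')) followed by a character translation '1'->'@', '0'->' '.
import Mathlib
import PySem

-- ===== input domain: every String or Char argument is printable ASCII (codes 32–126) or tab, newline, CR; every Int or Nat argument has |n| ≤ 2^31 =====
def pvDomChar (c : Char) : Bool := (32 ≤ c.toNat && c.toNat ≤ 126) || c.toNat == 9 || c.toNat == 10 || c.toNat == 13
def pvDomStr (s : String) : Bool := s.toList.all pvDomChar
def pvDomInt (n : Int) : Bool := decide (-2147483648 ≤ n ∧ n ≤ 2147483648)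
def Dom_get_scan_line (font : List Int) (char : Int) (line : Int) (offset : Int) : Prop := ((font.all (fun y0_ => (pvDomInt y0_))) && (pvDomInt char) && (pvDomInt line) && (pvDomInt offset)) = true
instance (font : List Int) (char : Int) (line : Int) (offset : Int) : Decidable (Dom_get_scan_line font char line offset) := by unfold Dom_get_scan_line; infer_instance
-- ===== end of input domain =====

-- B renders the byte via a closed-form 8-digit binary formatter (format(byte & 0xFF, '08b'))
-- plus a character translation, instead of A's bit-shifting accumulator loop (objective: idiomatic).

-- ===== PORT A =====
def get_scan_line (font : List Int) (char : Int) (line : Int) (offset : Int) : String :=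
  let index := char * 8 + line + offset   -- char << 3 = char * 8 (exact for all ints)
  match PySem.List.pyGet? font index with
  | none => ""                            -- IndexError in Python; excluded by Pre_
  | some byte0 =>
    -- for j in range(8): ch = "@" if byte & 1 else " "; line = ch + line; byte >>= 1
    let st := (List.range 8).foldl
      (fun (st : List Char × Int) _ =>
        ((if PySem.Int.mod st.2 2 ≠ 0 then '@' else ' ') :: st.1,
         PySem.Int.floordiv st.2 2)) ([], byte0)
    String.mk st.1

-- ===== PORT B =====
-- format(n, '08b') for the masked byte: MSB-first binary digits (closed form, exact)
def pvBin8 (n : Int) : List Char :=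
  (List.range 8).reverse.map (fun i => if n / 2 ^ i % 2 = 1 then '1' else '0')
-- str.maketrans('01', ' @') applied by translate
def pvTranslate (c : Char) : Char := if c = '1' then '@' else ' '

def get_scan_line_alt (font : List Int) (char : Int) (line : Int) (offset : Int) : String :=
  match PySem.List.pyGet? font (char * 8 + line + offset) with
  | none => ""                            -- IndexError in Python; excluded by Pre_
  | some byte => String.mk ((pvBin8 (PySem.Int.mod byte 256)).map pvTranslate)

-- ===== PRECONDITION & SPEC =====
-- Pre_ excludes exactly the inputs where font[index] raises IndexError in both programs.
def Pre_get_scan_line (font : List Int) (char : Int) (line : Int) (offset : Int) : Prop :=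
  PySem.Raise.InRange font.length (char * 8 + line + offset)
instance (font : List Int) (char : Int) (line : Int) (offset : Int) : Decidable (Pre_get_scan_line font char line offset) := by unfold Pre_get_scan_line; infer_instance

def pvWitness_get_scan_line : List Int × Int × Int × Int := ([60, 66, 165, 129, 129, 165, 66, 60], 0, 2, 0)

def Spec_get_scan_line (font : List Int) (char : Int) (line : Int) (offset : Int) (out : String) : Prop := out = get_scan_line_alt font char line offset
instance (font : List Int) (char : Int) (line : Int) (offset : Int) (out : String) : Decidable (Spec_get_scan_line font char line offset out) := by unfold Spec_get_scan_line; infer_instance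

-- ===== CLAIM (what is proved, stated in full; the proofs are below) =====
def Claim_equal_get_scan_line : Prop := ∀ (font : List Int) (char : Int) (line : Int) (offset : Int), Dom_get_scan_line font char line offset → Pre_get_scan_line font char line offset → Spec_get_scan_line font char line offset (get_scan_line font char line offset)

-- ===== LEMMAS AND PROOFS =====

lemma pvMod2 (x : Int) : PySem.Int.mod x 2 = x % 2 := by
  simp [PySem.Int.mod, Int.fmod_eq_emod]

lemma pvFdiv2 (x : Int) : PySem.Int.floordiv x 2 = x / 2 := by
  simp [PySem.Int.floordiv, Int.fdiv_eq_ediv]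

lemma pvCore (b : Int) :
    String.mk (((List.range 8).foldl
      (fun (st : List Char × Int) _ =>
        ((if PySem.Int.mod st.2 2 ≠ 0 then '@' else ' ') :: st.1,
         PySem.Int.floordiv st.2 2)) ([], b)).1)
    = String.mk ((pvBin8 (PySem.Int.mod b 256)).map pvTranslate) := by
  have hm : PySem.Int.mod b 256 = b % 256 := by simp [PySem.Int.mod, Int.fmod_eq_emod]
  simp only [show List.range 8 = [0,1,2,3,4,5,6,7] from rfl, List.foldl, pvMod2, pvFdiv2,
    hm, pvBin8, pvTranslate, List.map, List.reverse, List.reverseAux]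
  congr 1
  simp only [List.cons.injEq]
  refine ⟨?_, ?_, ?_, ?_, ?_, ?_, ?_, ?_, trivial⟩ <;> norm_num <;>
    split_ifs <;> first | rfl | (exfalso; omega) | omega | (simp_all <;> omega)

theorem get_scan_line_spec : Claim_equal_get_scan_line := by
  intro font char line offset _ hpre
  unfold Spec_get_scan_line get_scan_line get_scan_line_alt
  obtain ⟨b, hb⟩ : ∃ b, PySem.List.pyGet? font (char * 8 + line + offset) = some b := by
    rcases h : PySem.List.pyGet? font (char * 8 + line + offset) with _ | b
    · exact absurd hpre ((PySem.List.pyGet?_eq_none_iff _ _).mp h)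
    · exact ⟨b, rfl⟩
  simp only [hb]
  exact pvCore b
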